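-- pv_equiv track=rewrite | github.com/jchernjr/code | FlightPerf/perf.py | findLowerAndUpperBounds
-- ===== SOURCE A (Python) =====
-- def findLowerAndUpperBounds(tuples, cmpIndex, cmpValue):
--   #loAlt = max([tup[ALT] for tup in data if tup[ALT] <= alt])
--   #hiAlt = min([tup[ALT] for tup in data if tup[ALT] >= alt])
--   #loAltData = list(filter(lambda tup: tup[ALT] == loAlt, data))
--   #hiAltData = list(filter(lambda tup: tup[ALT] == hiAlt, data))
--   loVals = [tup[cmpIndex] for tup in tuples if tup[cmpIndex] <= cmpValue]
--   hiVals = [tup[cmpIndex] for tup in tuples if tup[cmpIndex] >= cmpValue]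
--   loVal = max(loVals) if loVals else None
--   hiVal = min(hiVals) if hiVals else None
--   loData = list(filter(lambda tup: tup[cmpIndex] == loVal, tuples))
--   hiData = list(filter(lambda tup: tup[cmpIndex] == hiVal, tuples))
--   return loData, hiData
-- ===== SOURCE B (Python) =====
-- def findLowerAndUpperBounds(tuples, cmpIndex, cmpValue):
--   groups = {}
--   for tup in tuples:
--     groups.setdefault(tup[cmpIndex], []).append(tup)
--   loVal = max((k for k in groups if k <= cmpValue), default=None)
--   hiVal = min((k for k in groups if k >= cmpValue), default=None)
--   return groups.get(loVal, []), groups.get(hiVal, [])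
-- ===== Notes on version B (the rewrite author's own statement) =====
-- stated objective: idiomatic
-- what changed: Replaces A's four value-scans plus two whole-list filter passes with a single grouping pass building a dict from each cmp value to its rows in original order, then picks the nearest lower/upper key and returns the stored groups.
import Mathlib
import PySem

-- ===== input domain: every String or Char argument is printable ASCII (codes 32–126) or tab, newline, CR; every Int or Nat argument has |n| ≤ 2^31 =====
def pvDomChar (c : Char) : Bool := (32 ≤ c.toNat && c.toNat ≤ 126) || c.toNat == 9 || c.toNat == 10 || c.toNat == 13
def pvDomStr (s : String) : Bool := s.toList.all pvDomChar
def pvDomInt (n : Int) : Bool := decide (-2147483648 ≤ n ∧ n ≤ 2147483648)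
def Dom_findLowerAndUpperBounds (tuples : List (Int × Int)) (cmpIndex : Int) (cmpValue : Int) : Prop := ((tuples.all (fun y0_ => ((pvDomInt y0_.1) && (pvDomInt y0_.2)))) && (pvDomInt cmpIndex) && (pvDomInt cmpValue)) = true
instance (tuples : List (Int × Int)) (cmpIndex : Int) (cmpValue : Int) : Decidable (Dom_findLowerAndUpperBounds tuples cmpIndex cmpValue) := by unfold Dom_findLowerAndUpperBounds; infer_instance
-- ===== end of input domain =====

-- B replaces A's four value-scans plus two whole-list filter passes with one grouping
-- pass (value -> rows dict) followed by nearest-key selection (objective: idiomatic).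


-- ===== PORT A =====
-- tup[cmpIndex] on a 2-tuple: exact via PySem.List.pyGet? (the .getD 0 default is
-- unreachable under Pre_, which requires a valid index whenever tuples ≠ []).
def tupGet (t : Int × Int) (i : Int) : Int := (PySem.List.pyGet? [t.1, t.2] i).getD 0

def findLowerAndUpperBounds (tuples : List (Int × Int)) (cmpIndex : Int) (cmpValue : Int) : (List (Int × Int)) × (List (Int × Int)) :=
  let loVals := (tuples.filter (fun tup => decide (tupGet tup cmpIndex ≤ cmpValue))).map (fun tup => tupGet tup cmpIndex)
  let hiVals := (tuples.filter (fun tup => decide (cmpValue ≤ tupGet tup cmpIndex))).map (fun tup => tupGet tup cmpIndex)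
  let loVal : Option Int := if loVals.isEmpty then none else PySem.List.max? loVals (fun x => x)
  let hiVal : Option Int := if hiVals.isEmpty then none else PySem.List.min? hiVals (fun x => x)
  let loData := tuples.filter (fun tup => some (tupGet tup cmpIndex) == loVal)
  let hiData := tuples.filter (fun tup => some (tupGet tup cmpIndex) == hiVal)
  (loData, hiData)

-- ===== PORT B =====
-- groups.setdefault(k, []).append(tup) = modify k [] (· ++ [tup])
def findLowerAndUpperBounds_alt (tuples : List (Int × Int)) (cmpIndex : Int) (cmpValue : Int) : (List (Int × Int)) × (List (Int × Int)) :=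
  let groups : PySem.Dict Int (List (Int × Int)) :=
    tuples.foldl (fun d tup => d.modify (tupGet tup cmpIndex) [] (fun xs => xs ++ [tup])) PySem.Dict.empty
  let loVal : Option Int := PySem.List.max? (groups.keys.filter (fun k => decide (k ≤ cmpValue))) (fun x => x)
  let hiVal : Option Int := PySem.List.min? (groups.keys.filter (fun k => decide (cmpValue ≤ k))) (fun x => x)
  (match loVal with | none => [] | some k => groups.getD k [],
   match hiVal with | none => [] | some k => groups.getD k [])

-- ===== PRECONDITION & SPEC =====
-- Pre_ excludes exactly the inputs where Python A raises IndexError: a nonempty list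
-- with cmpIndex outside {-2,-1,0,1} (tup[cmpIndex] on a 2-tuple).
def Pre_findLowerAndUpperBounds (tuples : List (Int × Int)) (cmpIndex : Int) (cmpValue : Int) : Prop :=
  tuples = [] ∨ (-2 ≤ cmpIndex ∧ cmpIndex ≤ 1)
instance (tuples : List (Int × Int)) (cmpIndex : Int) (cmpValue : Int) : Decidable (Pre_findLowerAndUpperBounds tuples cmpIndex cmpValue) := by unfold Pre_findLowerAndUpperBounds; infer_instance
def pvWitness_findLowerAndUpperBounds : (List (Int × Int)) × Int × Int := ([(1, 10), (3, 30), (1, 20)], 0, 2)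

def Spec_findLowerAndUpperBounds (tuples : List (Int × Int)) (cmpIndex : Int) (cmpValue : Int) (out : (List (Int × Int)) × (List (Int × Int))) : Prop := out = findLowerAndUpperBounds_alt tuples cmpIndex cmpValue
instance (tuples : List (Int × Int)) (cmpIndex : Int) (cmpValue : Int) (out : (List (Int × Int)) × (List (Int × Int))) : Decidable (Spec_findLowerAndUpperBounds tuples cmpIndex cmpValue out) := by unfold Spec_findLowerAndUpperBounds; infer_instance

-- ===== CLAIM (what is proved, stated in full; the proofs are below) =====
def Claim_equal_findLowerAndUpperBounds : Prop := ∀ (tuples : List (Int × Int)) (cmpIndex : Int) (cmpValue : Int), Dom_findLowerAndUpperBounds tuples cmpIndex cmpValue → Pre_findLowerAndUpperBounds tuples cmpIndex cmpValue → Spec_findLowerAndUpperBounds tuples cmpIndex cmpValue (findLowerAndUpperBounds tuples cmpIndex cmpValue)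

-- ===== LEMMAS AND PROOFS =====

-- the grouping dict looked up at k is the original filter
theorem groups_getD (tuples : List (Int × Int)) (i k : Int) :
    (tuples.foldl (fun d tup => d.modify (tupGet tup i) [] (fun xs => xs ++ [tup])) PySem.Dict.empty).getD k []
      = tuples.filter (fun tup => tupGet tup i == k) := by
  have h := PySem.Dict.getD_foldl_modify_append
    (l := tuples.map (fun tup => (tupGet tup i, tup)))
    (d := (PySem.Dict.empty : PySem.Dict Int (List (Int × Int)))) (c := k)
  rw [List.foldl_map] at h
  simpa only [List.filter_map, Function.comp_def, List.map_map, List.map_id',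
    PySem.Dict.getD_empty, List.nil_append] using h

-- the key list is the ordered dedup of the mapped values
theorem groups_keys (tuples : List (Int × Int)) (i : Int) :
    (tuples.foldl (fun d tup => d.modify (tupGet tup i) [] (fun xs => xs ++ [tup])) PySem.Dict.empty).keys
      = PySem.List.dedup (tuples.map (fun tup => tupGet tup i)) := by
  rw [PySem.Dict.keys_foldl_modify_key]
  simp [PySem.Set.update_nil_left]

-- max?/min? with identity key depend only on membership
theorem max?_id_eq_of_mem_iff (xs ys : List Int) (h : ∀ a, a ∈ xs ↔ a ∈ ys) :
    PySem.List.max? xs (fun x => x) = PySem.List.max? ys (fun x => x) := by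
  cases hx : PySem.List.max? xs (fun x => x) with
  | none =>
      rw [PySem.List.max?_eq_none_iff] at hx
      have : ys = [] := by
        cases hy : ys with
        | nil => rfl
        | cons b t => exact absurd ((h b).mpr (by simp [hy])) (by simp [hx])
      rw [this]; rfl
  | some m =>
      cases hy : PySem.List.max? ys (fun x => x) with
      | none =>
          rw [PySem.List.max?_eq_none_iff] at hy
          exact absurd ((h m).mp (PySem.List.max?_mem hx)) (by simp [hy])
      | some n =>
          have h1 : m ≤ n := PySem.List.max?_isMax hy m ((h m).mp (PySem.List.max?_mem hx))
          have h2 : n ≤ m := PySem.List.max?_isMax hx n ((h n).mpr (PySem.List.max?_mem hy))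
          exact congrArg some (le_antisymm h1 h2)

theorem min?_id_eq_of_mem_iff (xs ys : List Int) (h : ∀ a, a ∈ xs ↔ a ∈ ys) :
    PySem.List.min? xs (fun x => x) = PySem.List.min? ys (fun x => x) := by
  cases hx : PySem.List.min? xs (fun x => x) with
  | none =>
      rw [PySem.List.min?_eq_none_iff] at hx
      have : ys = [] := by
        cases hy : ys with
        | nil => rfl
        | cons b t => exact absurd ((h b).mpr (by simp [hy])) (by simp [hx])
      rw [this]; rfl
  | some m =>
      cases hy : PySem.List.min? ys (fun x => x) with
      | none =>
          rw [PySem.List.min?_eq_none_iff] at hy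
          exact absurd ((h m).mp (PySem.List.min?_mem hx)) (by simp [hy])
      | some n =>
          have h1 : n ≤ m := PySem.List.min?_isMin hy m ((h m).mp (PySem.List.min?_mem hx))
          have h2 : m ≤ n := PySem.List.min?_isMin hx n ((h n).mpr (PySem.List.min?_mem hy))
          exact congrArg some (le_antisymm h2 h1)

-- the guard 'if loVals.isEmpty then none else max? …' is just max? (none on [])
theorem guarded_max? (xs : List Int) :
    (if xs.isEmpty then none else PySem.List.max? xs (fun x => x)) = PySem.List.max? xs (fun x => x) := by
  cases xs with
  | nil => rfl
  | cons a t => rfl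

theorem guarded_min? (xs : List Int) :
    (if xs.isEmpty then none else PySem.List.min? xs (fun x => x)) = PySem.List.min? xs (fun x => x) := by
  cases xs with
  | nil => rfl
  | cons a t => rfl

theorem findLowerAndUpperBounds_spec : Claim_equal_findLowerAndUpperBounds := by
  unfold Claim_equal_findLowerAndUpperBounds
  intro tuples cmpIndex cmpValue _ _
  unfold Spec_findLowerAndUpperBounds findLowerAndUpperBounds findLowerAndUpperBounds_alt
  simp only [groups_getD, groups_keys, guarded_max?, guarded_min?]
  have hmemlo : ∀ a : Int,
      a ∈ (tuples.filter (fun tup => decide (tupGet tup cmpIndex ≤ cmpValue))).map (fun tup => tupGet tup cmpIndex)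
      ↔ a ∈ (PySem.List.dedup (tuples.map (fun tup => tupGet tup cmpIndex))).filter (fun k => decide (k ≤ cmpValue)) := by
    intro a
    simp only [List.mem_map, List.mem_filter, PySem.List.mem_dedup, decide_eq_true_eq]
    constructor
    · rintro ⟨t, ⟨ht, hle⟩, rfl⟩; exact ⟨⟨t, ht, rfl⟩, hle⟩
    · rintro ⟨⟨t, ht, rfl⟩, hle⟩; exact ⟨t, ⟨ht, hle⟩, rfl⟩
  have hmemhi : ∀ a : Int,
      a ∈ (tuples.filter (fun tup => decide (cmpValue ≤ tupGet tup cmpIndex))).map (fun tup => tupGet tup cmpIndex)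
      ↔ a ∈ (PySem.List.dedup (tuples.map (fun tup => tupGet tup cmpIndex))).filter (fun k => decide (cmpValue ≤ k)) := by
    intro a
    simp only [List.mem_map, List.mem_filter, PySem.List.mem_dedup, decide_eq_true_eq]
    constructor
    · rintro ⟨t, ⟨ht, hle⟩, rfl⟩; exact ⟨⟨t, ht, rfl⟩, hle⟩
    · rintro ⟨⟨t, ht, rfl⟩, hle⟩; exact ⟨t, ⟨ht, hle⟩, rfl⟩
  rw [max?_id_eq_of_mem_iff _ _ hmemlo, min?_id_eq_of_mem_iff _ _ hmemhi]
  simp only [Prod.mk.injEq]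
  refine ⟨?_, ?_⟩
  · cases PySem.List.max? ((PySem.List.dedup (tuples.map (fun tup => tupGet tup cmpIndex))).filter (fun k => decide (k ≤ cmpValue))) (fun x => x) with
    | none => exact (List.filter_congr (fun a _ => rfl)).trans (List.filter_false _)
    | some k => exact List.filter_congr (fun a _ => rfl)
  · cases PySem.List.min? ((PySem.List.dedup (tuples.map (fun tup => tupGet tup cmpIndex))).filter (fun k => decide (cmpValue ≤ k))) (fun x => x) with
    | none => exact (List.filter_congr (fun a _ => rfl)).trans (List.filter_false _)
    | some k => exact List.filter_congr (fun a _ => rfl)
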